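-- pv_equiv track=rewrite | github.com/Jon-Lein/ROP_Chain_Final_Prototypes | imports/ROP_Counting_Functions.py | count_derefrenced_registers
-- ===== SOURCE A (Python) =====
-- def count_derefrenced_registers(g_array, s_or_d):
-- 	registers = {'eax': 0, 'ebx':0, 'ecx':0, 'edx':0, 'edi':0, 'esi':0, 'esp':0, 'ebp':0}
--
-- 	for r in registers:
-- 		if s_or_d == "source" or s_or_d == "s":
-- 			search_start = "[" + r
-- 			search_end = "],"
-- 		elif s_or_d == "destination" or s_or_d == "d":
-- 			search_start = "[" + r
-- 			search_end = "] "
--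
-- 		for i in g_array:
-- 			for j in i['Gadget']:
-- 				if j.find(search_start) >= 0 and j.find(search_end) >= 0:
-- 					registers[r] += 1
-- 	return registers
-- ===== SOURCE B (Python) =====
-- def count_derefrenced_registers(g_array, s_or_d):
-- 	regs = ('eax', 'ebx', 'ecx', 'edx', 'edi', 'esi', 'esp', 'ebp')
-- 	if s_or_d == "source" or s_or_d == "s":
-- 		search_end = "],"
-- 	elif s_or_d == "destination" or s_or_d == "d":
-- 		search_end = "] "
-- 	tally = {}
-- 	for i in g_array:
-- 		for j in i['Gadget']:
-- 			if search_end in j: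
-- 				for tok in {j[k + 1:k + 4] for k, c in enumerate(j) if c == '['}:
-- 					tally[tok] = tally.get(tok, 0) + 1
-- 	return {r: tally.get(r, 0) for r in regs}
-- ===== Notes on version B (the rewrite author's own statement) =====
-- stated objective: alternative
-- what changed: B never searches for any per-register pattern: for each instruction whose s_or_d-derived suffix marker occurs, it scans the characters once, extracts the set of 3-character tokens following each '[', tallies those tokens in one dict, and finally projects the tally onto the 8 register names; A instead reruns two substring searches over every instruction for each of the 8 registers.
import Mathlib
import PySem

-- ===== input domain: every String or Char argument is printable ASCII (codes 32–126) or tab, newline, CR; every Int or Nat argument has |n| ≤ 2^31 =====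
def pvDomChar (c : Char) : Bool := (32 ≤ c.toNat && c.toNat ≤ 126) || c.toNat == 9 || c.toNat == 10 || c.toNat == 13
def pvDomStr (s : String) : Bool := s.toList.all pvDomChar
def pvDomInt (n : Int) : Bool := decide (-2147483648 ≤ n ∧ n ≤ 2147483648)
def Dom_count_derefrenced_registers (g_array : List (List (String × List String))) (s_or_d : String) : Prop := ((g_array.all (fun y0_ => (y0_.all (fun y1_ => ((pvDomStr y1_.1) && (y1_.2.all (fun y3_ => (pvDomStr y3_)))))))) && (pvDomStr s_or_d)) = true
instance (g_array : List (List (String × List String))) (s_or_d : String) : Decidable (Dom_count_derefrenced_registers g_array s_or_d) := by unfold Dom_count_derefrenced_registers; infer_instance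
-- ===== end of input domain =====

-- B replaces A's per-register substring searches by an extract-and-tally pass: it pulls the
-- 3-character token after each '[' of a marker-matching instruction, counts those tokens in one
-- dict, and projects the tally onto the 8 register names at the end (same return value).

-- the fixed register key list of both programs
def pvRegs : List String := ["eax", "ebx", "ecx", "edx", "edi", "esi", "esp", "ebp"]

-- counts[r] += 1 on an association list (first matching key)
def bump : List (String × Int) → String → List (String × Int)
  | [], _ => []
  | (k, v) :: t, r => if k = r then (k, v + 1) :: t else (k, v) :: bump t r

-- ===== PORT A =====
def count_derefrenced_registers (g_array : List (List (String × List String))) (s_or_d : String) : List (String × Int) :=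
  let registers : List (String × Int) := pvRegs.map (fun r => (r, 0))
  pvRegs.foldl (fun regs r =>
    let search_start := "[" ++ r
    let search_end := if s_or_d == "source" || s_or_d == "s" then "],"
      else if s_or_d == "destination" || s_or_d == "d" then "] " else ""
    g_array.foldl (fun regs i =>
      (((PySem.Dict.mk i).get? "Gadget").getD []).foldl (fun regs j =>
        if 0 ≤ PySem.Str.find j search_start ∧ 0 ≤ PySem.Str.find j search_end then
          bump regs r
        else regs) regs) regs) registers

-- ===== PORT B =====
-- {j[k+1:k+4] for k, c in enumerate(j) if c == '['} : the set of 3-char tokens after each '['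
def pvHits (j : String) : PySem.Set String :=
  PySem.Set.ofList ((PySem.List.enumerate j.toList).filterMap (fun kc =>
    if kc.2 = '[' then some (String.ofList (PySem.List.slice j.toList (some (kc.1 + 1)) (some (kc.1 + 4)))) else none))

def count_derefrenced_registers_alt (g_array : List (List (String × List String))) (s_or_d : String) : List (String × Int) :=
  let search_end := if s_or_d == "source" || s_or_d == "s" then "],"
    else if s_or_d == "destination" || s_or_d == "d" then "] " else ""
  let tally : PySem.Dict String Int :=
    g_array.foldl (fun t i =>
      (((PySem.Dict.mk i).get? "Gadget").getD []).foldl (fun t j =>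
        if PySem.Str.isIn search_end j then
          (pvHits j).foldl (fun t tok => t.insert tok (t.getD tok 0 + 1)) t
        else t) t) PySem.Dict.empty
  pvRegs.map (fun r => (r, tally.getD r 0))

-- ===== PRECONDITION & SPEC =====
-- Pre_ excludes exactly the inputs where the Python A raises: a gadget dict without the key
-- 'Gadget' (KeyError), and an s_or_d that is none of source/s/destination/d while some
-- instruction exists (NameError: search_start/search_end unbound).
def Pre_count_derefrenced_registers (g_array : List (List (String × List String))) (s_or_d : String) : Prop :=
  (∀ i ∈ g_array, ((PySem.Dict.mk i).get? "Gadget").isSome = true) ∧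
  (s_or_d = "source" ∨ s_or_d = "s" ∨ s_or_d = "destination" ∨ s_or_d = "d" ∨
    ∀ i ∈ g_array, ((PySem.Dict.mk i).get? "Gadget").getD [] = [])
instance (g_array : List (List (String × List String))) (s_or_d : String) : Decidable (Pre_count_derefrenced_registers g_array s_or_d) := by unfold Pre_count_derefrenced_registers; infer_instance

def pvWitness_count_derefrenced_registers : (List (List (String × List String))) × String :=
  ([[("Gadget", ["mov eax, [ebx] ;", "pop edi ;"])]], "d")

def Spec_count_derefrenced_registers (g_array : List (List (String × List String))) (s_or_d : String) (out : List (String × Int)) : Prop := out = count_derefrenced_registers_alt g_array s_or_d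
instance (g_array : List (List (String × List String))) (s_or_d : String) (out : List (String × Int)) : Decidable (Spec_count_derefrenced_registers g_array s_or_d out) := by unfold Spec_count_derefrenced_registers; infer_instance

-- ===== CLAIM (what is proved, stated in full; the proofs are below) =====
def Claim_equal_count_derefrenced_registers : Prop := ∀ (g_array : List (List (String × List String))) (s_or_d : String), Dom_count_derefrenced_registers g_array s_or_d → Pre_count_derefrenced_registers g_array s_or_d → Spec_count_derefrenced_registers g_array s_or_d (count_derefrenced_registers g_array s_or_d)

-- ===== LEMMAS AND PROOFS =====

-- addAt d r n : add n to the entry of the first key r (proof-only generalisation of bump)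
def addAt : List (String × Int) → String → Int → List (String × Int)
  | [], _, _ => []
  | (k, v) :: t, r, n => if k = r then (k, v + n) :: t else (k, v) :: addAt t r n

theorem bump_eq_addAt (d : List (String × Int)) (r : String) : bump d r = addAt d r 1 := by
  induction d with
  | nil => rfl
  | cons p t ih => obtain ⟨k, v⟩ := p; simp only [bump, addAt]; split_ifs <;> simp [ih]

theorem addAt_zero (d : List (String × Int)) (r : String) : addAt d r 0 = d := by
  induction d with
  | nil => rfl
  | cons p t ih => obtain ⟨k, v⟩ := p; simp only [addAt]; split_ifs <;> simp [ih]

theorem addAt_addAt_same (d : List (String × Int)) (r : String) (m n : Int) :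
    addAt (addAt d r m) r n = addAt d r (m + n) := by
  induction d with
  | nil => rfl
  | cons p t ih =>
    obtain ⟨k, v⟩ := p
    by_cases h : k = r
    · simp [addAt, h, add_assoc]
    · simp [addAt, h, ih]

-- A's innermost loop for one register: conditional increments are one addAt of the count
theorem foldl_bump_count (p : String → Prop) [DecidablePred p] (r : String)
    (L : List String) (d : List (String × Int)) :
    L.foldl (fun d j => if p j then bump d r else d) d
      = addAt d r ((L.countP (fun j => decide (p j)) : Nat) : Int) := by
  induction L generalizing d with
  | nil => simp [addAt_zero]
  | cons j t ih =>
    rw [List.foldl_cons, List.countP_cons]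
    by_cases h : p j
    · rw [if_pos h, ih, bump_eq_addAt, addAt_addAt_same]
      congr 1
      simp [h]
      omega
    · rw [if_neg h, ih]
      congr 1
      simp [h]

-- a fold over keys not containing k passes a leading (k, v) entry through
theorem foldl_addAt_skip (K : List String) (a : String → Int) (k : String) (v : Int)
    (d : List (String × Int)) (hk : k ∉ K) :
    K.foldl (fun d r => addAt d r (a r)) ((k, v) :: d)
      = (k, v) :: K.foldl (fun d r => addAt d r (a r)) d := by
  induction K generalizing d with
  | nil => rfl
  | cons r t ih =>
    simp only [List.mem_cons, not_or] at hk
    simp only [List.foldl_cons, addAt, if_neg hk.1]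
    exact ih _ hk.2

-- folding one addAt per distinct key over the zero table yields the table of the weights
theorem foldl_addAt_map (K : List String) (a : String → Int) (hK : K.Nodup) :
    K.foldl (fun d r => addAt d r (a r)) (K.map (fun r => (r, 0)))
      = K.map (fun r => (r, a r)) := by
  induction K with
  | nil => rfl
  | cons k t ih =>
    have hk : k ∉ t := (List.nodup_cons.mp hK).1
    have h1 : addAt ((k, 0) :: t.map (fun r => (r, 0))) k (a k)
        = (k, a k) :: t.map (fun r => (r, 0)) := by simp [addAt]
    rw [List.map_cons, List.foldl_cons, h1, foldl_addAt_skip t a k (a k) _ hk,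
      ih (List.nodup_cons.mp hK).2, List.map_cons]

-- a nested fold over the per-gadget instruction lists is a fold over their concatenation
theorem foldl_flatMap_eq {ι α β : Type} (g : List ι) (js : ι → List β)
    (f : α → β → α) (d : α) :
    g.foldl (fun d i => (js i).foldl f d) d = (g.flatMap js).foldl f d := by
  induction g generalizing d with
  | nil => rfl
  | cons i t ih => simp only [List.foldl_cons, List.flatMap_cons, List.foldl_append, ih]

-- a nodup list counts any element 0 or 1 times
theorem count_nodup (l : List String) (hl : l.Nodup) (r : String) :
    l.count r = if r ∈ l then 1 else 0 := by
  by_cases h : r ∈ l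
  · rw [if_pos h]
    exact List.count_eq_one_of_mem hl h
  · rw [if_neg h]
    exact List.count_eq_zero_of_not_mem h

-- B's tally after the flattened instruction loop, read at any key
theorem tally_getD (se : String) (L : List String) (t : PySem.Dict String Int) (r : String) :
    (L.foldl (fun t j =>
        if PySem.Str.isIn se j then
          (pvHits j).foldl (fun t tok => t.insert tok (t.getD tok 0 + 1)) t
        else t) t).getD r 0
      = t.getD r 0 + ((L.countP (fun j => PySem.Str.isIn se j && decide (r ∈ pvHits j)) : Nat) : Int) := by
  induction L generalizing t with
  | nil => simp
  | cons j l ih =>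
    rw [List.foldl_cons, List.countP_cons]
    by_cases hse : PySem.Str.isIn se j = true
    · rw [if_pos hse, ih, PySem.Dict.getD_foldl_insert_add_one,
        count_nodup (pvHits j) (by rw [pvHits]; exact PySem.Set.nodup_ofList _) r]
      by_cases hm : r ∈ pvHits j
      · rw [if_pos hm]
        have hp : (PySem.Str.isIn se j && decide (r ∈ pvHits j)) = true := by
          rw [hse, decide_eq_true hm, Bool.and_self]
        rw [hp]
        simp only [if_pos]
        push_cast
        ring
      · rw [if_neg hm]
        have hq : (PySem.Str.isIn se j && decide (r ∈ pvHits j)) = false := by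
          rw [decide_eq_false hm, Bool.and_false]
        rw [hq]
        simp
    · rw [if_neg hse, ih]
      have h0 : PySem.Str.isIn se j = false := by
        cases hB : PySem.Str.isIn se j
        · rfl
        · exact absurd hB hse
      rw [h0, Bool.false_and]
      simp

-- 0 <= j.find(sub) agrees with 'sub in j'
theorem str_find_nonneg_iff (s sub : String) :
    0 ≤ PySem.Str.find s sub ↔ PySem.Str.isIn sub s = true := by
  rw [PySem.Str.find_eq, PySem.Str.isIn_eq]
  exact Iff.trans (PySem.Chars.find_nonneg_iff _ _) (Iff.symm (PySem.Chars.isIn_iff_infix _ _))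

-- extracted-token membership is exactly A's search_start substring test (all registers have 3 chars)
theorem mem_pvHits_iff (j r : String) (h3 : r.toList.length = 3) :
    r ∈ pvHits j ↔ PySem.Str.isIn ("[" ++ r) j = true := by
  have hiff := PySem.Chars.exists_prefix_drop_iff_isIn (("[" ++ r).toList) j.toList
  rw [pvHits, PySem.Set.mem_ofList, List.mem_filterMap, PySem.Str.isIn_eq, ← hiff]
  have htl : ("[" ++ r).toList = '[' :: r.toList := by
    rw [String.toList_append]; rfl
  constructor
  · rintro ⟨kc, hmem, hf⟩
    rw [PySem.List.mem_enumerate_iff] at hmem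
    obtain ⟨k, hk, rfl⟩ := hmem
    dsimp only at hf
    split_ifs at hf with hc
    · refine ⟨k, ?_⟩
      rw [htl, List.drop_eq_getElem_cons hk, List.cons_prefix_cons]
      refine ⟨hc.symm, ?_⟩
      have hsl : PySem.List.slice j.toList (some ((0 : Int) + k + 1)) (some ((0 : Int) + k + 4))
          = (j.toList.drop (k + 1)).take 3 := by
        have e1 : (0 : Int) + k + 1 = ((k + 1 : Nat) : Int) := by push_cast; ring
        have e2 : (0 : Int) + k + 4 = ((k + 4 : Nat) : Int) := by push_cast; ring
        rw [e1, e2, PySem.List.slice_natCast]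
        congr 1
        omega
      rw [hsl] at hf
      have hft := congrArg String.toList (Option.some.inj hf)
      rw [String.toList_ofList] at hft
      rw [← hft]
      exact List.take_prefix _ _
  · rintro ⟨i, hpre⟩
    rw [htl] at hpre
    have hi : i < j.toList.length := by
      by_contra hge
      rw [List.drop_eq_nil_iff.mpr (by omega)] at hpre
      simp at hpre
    rw [List.drop_eq_getElem_cons hi, List.cons_prefix_cons] at hpre
    obtain ⟨hc, hrest⟩ := hpre
    refine ⟨((0 : Int) + i, j.toList[i]), ?_, ?_⟩
    · rw [PySem.List.mem_enumerate_iff]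
      exact ⟨i, hi, rfl⟩
    · rw [if_pos hc.symm]
      have e1 : (0 : Int) + i + 1 = ((i + 1 : Nat) : Int) := by push_cast; ring
      have e2 : (0 : Int) + i + 4 = ((i + 4 : Nat) : Int) := by push_cast; ring
      rw [e1, e2, PySem.List.slice_natCast]
      have ht : (j.toList.drop (i + 1)).take 3 = r.toList := by
        have hq := List.prefix_iff_eq_take.mp hrest
        rw [h3] at hq
        exact hq.symm
      have e3 : i + 4 - (i + 1) = 3 := by omega
      rw [e3, ht, String.ofList_toList]

-- ===== VERDICT (by name: the statement is the Claim_ definition above) =====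
theorem count_derefrenced_registers_spec : Claim_equal_count_derefrenced_registers := by
  intro g_array s_or_d _ _
  unfold Spec_count_derefrenced_registers
  unfold count_derefrenced_registers count_derefrenced_registers_alt
  set se := if s_or_d == "source" || s_or_d == "s" then "],"
      else if s_or_d == "destination" || s_or_d == "d" then "] " else "" with hse
  set L := g_array.flatMap (fun i => ((PySem.Dict.mk i).get? "Gadget").getD []) with hL
  -- A side: flatten the gadget loop, then collapse each register scan to one addAt of its count
  have hA : ∀ r d, g_array.foldl (fun regs i =>
      (((PySem.Dict.mk i).get? "Gadget").getD []).foldl (fun regs j =>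
        if 0 ≤ PySem.Str.find j ("[" ++ r) ∧ 0 ≤ PySem.Str.find j se then bump regs r
        else regs) regs) d
      = addAt d r ((L.countP (fun j =>
          decide (0 ≤ PySem.Str.find j ("[" ++ r) ∧ 0 ≤ PySem.Str.find j se)) : Nat) : Int) := by
    intro r d
    rw [foldl_flatMap_eq, ← hL, foldl_bump_count]
  simp only [hA]
  rw [foldl_addAt_map _ _ (by decide)]
  -- B side: flatten, then read the tally at each register key
  rw [foldl_flatMap_eq, ← hL]
  refine List.map_congr_left ?_
  intro r hr
  have h3 : r.toList.length = 3 := by fin_cases hr <;> decide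
  rw [tally_getD se L PySem.Dict.empty r, PySem.Dict.getD_empty, zero_add]
  congr 2
  refine List.countP_congr ?_
  intro j _
  by_cases hend : PySem.Str.isIn se j = true
  · have hfe : 0 ≤ PySem.Str.find j se := (str_find_nonneg_iff j se).mpr hend
    by_cases hs : PySem.Str.isIn ("[" ++ r) j = true
    · have hfs : 0 ≤ PySem.Str.find j ("[" ++ r) := (str_find_nonneg_iff j _).mpr hs
      have hm : r ∈ pvHits j := (mem_pvHits_iff j r h3).mpr hs
      rw [decide_eq_true ⟨hfs, hfe⟩, hend, decide_eq_true hm, Bool.and_self]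
    · have hfs : ¬ 0 ≤ PySem.Str.find j ("[" ++ r) := fun hc =>
        hs ((str_find_nonneg_iff j _).mp hc)
      have hm : r ∉ pvHits j := fun hc => hs ((mem_pvHits_iff j r h3).mp hc)
      rw [decide_eq_false (fun hc => hfs hc.1), hend, Bool.true_and, decide_eq_false hm]
  · have hfe : ¬ 0 ≤ PySem.Str.find j se := fun hc =>
      hend ((str_find_nonneg_iff j se).mp hc)
    have h0 : PySem.Str.isIn se j = false := by
      cases hB : PySem.Str.isIn se j
      · rfl
      · exact absurd hB hend
    rw [decide_eq_false (fun hc => hfe hc.2), h0, Bool.false_and]
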